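-- pv_equiv track=rewrite | github.com/AlexMercer12138/simple_cpu | assembler/assembler.py | format_coe
-- ===== SOURCE A (Python) =====
-- from typing import List, Tuple, Optional, Dict, Union
--
-- def format_coe(codes: List[int]) -> str:
--     """格式化为Xilinx COE文件"""
--     lines = [
--         '; Simple CPU Program Memory COE File',
--         'memory_initialization_radix=16;',
--         'memory_initialization_vector=',
--     ]
--     for i, code in enumerate(codes):
--         if i == len(codes) - 1:
--             lines.append(f"{code:08X};")
--         else:
--             lines.append(f"{code:08X},")
--     return '\n'.join(lines)
-- ===== SOURCE B (Python) =====
-- def format_coe(codes):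
--     """格式化为Xilinx COE文件"""
--     header = ('; Simple CPU Program Memory COE File\n'
--               'memory_initialization_radix=16;\n'
--               'memory_initialization_vector=')
--     if not codes:
--         return header
--     # build the lines BACK-TO-FRONT: terminated last word first, then each
--     # earlier word with its comma, finally the header; one reversed join at the end
--     parts = [f"{codes[-1]:08X};"]
--     for code in reversed(codes[:-1]):
--         parts.append(f"{code:08X},")
--     parts.append(header)
--     return '\n'.join(reversed(parts))
-- ===== Notes on version B (the rewrite author's own statement) =====
-- stated objective: alternative
-- what changed: B builds the vector body BACK-TO-FRONT: it starts from the terminated last word 'XXXXXXXX;' and prepends 'XXXXXXXX,\n' for each earlier code while walking the list in reverse, instead of A's forward enumerate with a last-index branch appended to a line list that is joined at the end.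
import Mathlib
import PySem

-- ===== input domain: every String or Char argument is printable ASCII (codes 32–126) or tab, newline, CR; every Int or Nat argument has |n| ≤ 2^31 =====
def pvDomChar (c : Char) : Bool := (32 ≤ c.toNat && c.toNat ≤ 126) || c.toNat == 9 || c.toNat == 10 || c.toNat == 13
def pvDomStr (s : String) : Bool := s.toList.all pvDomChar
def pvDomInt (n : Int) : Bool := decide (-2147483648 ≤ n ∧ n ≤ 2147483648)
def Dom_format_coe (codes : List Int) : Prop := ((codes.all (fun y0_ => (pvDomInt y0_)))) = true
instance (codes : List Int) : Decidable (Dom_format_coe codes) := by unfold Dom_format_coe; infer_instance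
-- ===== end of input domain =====

-- B builds the vector body back-to-front (reverse walk, prepending to an accumulator seeded with the terminated last word) instead of A's forward enumerate with a last-index branch; objective: alternative.

-- f"{code:08X}" — Python's 08X format: uppercase hex of |code|, zero-padded to total
-- width 8 with the '-' sign (if any) in front and counted in the width. Hand-ported
-- (no PySem primitive); exact for any int (padding only drops when digits overflow the width).
def pyHex08 (n : Int) : List Char :=
  let ds := (Nat.toDigits 16 n.natAbs).map PySem.Chars.upperChar
  if n < 0 then '-' :: (List.replicate (7 - ds.length) '0' ++ ds)
  else List.replicate (8 - ds.length) '0' ++ ds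

def coeHeader : List (List Char) :=
  [ "; Simple CPU Program Memory COE File".toList,
    "memory_initialization_radix=16;".toList,
    "memory_initialization_vector=".toList ]

-- ===== PORT A =====
-- ports work on List Char via PySem.Chars (exact); the final String.ofList only wraps the result
def format_coe (codes : List Int) : String :=
  let lines := coeHeader
  let lines := (PySem.List.enumerate codes).foldl
    (fun ls p =>
      if p.1 = (codes.length : Int) - 1 then ls ++ [pyHex08 p.2 ++ [';']]
      else ls ++ [pyHex08 p.2 ++ [',']]) lines
  String.ofList (PySem.Chars.join ['\n'] lines)

-- ===== PORT B =====
-- B's header is one literal string with embedded newlines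
def coeHeaderStr : List Char :=
  "; Simple CPU Program Memory COE File\nmemory_initialization_radix=16;\nmemory_initialization_vector=".toList

def format_coe_alt (codes : List Int) : String :=
  match codes.getLast? with          -- 'if not codes' guard; codes[-1] of the nonempty list
  | none => String.ofList coeHeaderStr
  | some last =>
      -- parts built back-to-front: terminated last word, earlier words with commas, header
      let parts := (codes.dropLast.reverse).foldl
        (fun ps c => ps ++ [pyHex08 c ++ [',']]) [pyHex08 last ++ [';']]
      let parts := parts ++ [coeHeaderStr]
      String.ofList (PySem.Chars.join ['\n'] parts.reverse)

-- ===== PRECONDITION & SPEC =====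
def Spec_format_coe (codes : List Int) (out : String) : Prop := out = format_coe_alt codes
instance (codes : List Int) (out : String) : Decidable (Spec_format_coe codes out) := by unfold Spec_format_coe; infer_instance

-- ===== CLAIM =====
def Claim_equal_format_coe : Prop := ∀ (codes : List Int), Dom_format_coe codes → Spec_format_coe codes (format_coe codes)

-- ===== LEMMAS AND PROOFS =====

-- A's loop is an append-only fold: it equals the start list ++ the mapped entries
theorem foldl_entries (l : List (Int × Int)) (q : Int) (acc : List (List Char)) :
    l.foldl (fun ls p =>
      if p.1 = q then ls ++ [pyHex08 p.2 ++ [';']] else ls ++ [pyHex08 p.2 ++ [',']]) acc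
    = acc ++ l.map (fun p => pyHex08 p.2 ++ (if p.1 = q then [';'] else [','])) := by
  induction l generalizing acc with
  | nil => simp
  | cons x t ih =>
      simp only [List.foldl_cons, List.map_cons]
      by_cases h : x.1 = q <;> simp [h, ih]

-- joining A's entry list (',' after every element but the last, then ';') with '\n'
-- equals the ',\n'-join of the bare hex words followed by one ';'
theorem join_entries (l : List Int) : ∀ (s : Int), l ≠ [] →
    PySem.Chars.join ['\n']
      ((PySem.List.enumerate l s).map
        (fun p => pyHex08 p.2 ++ (if p.1 = s + (l.length : Int) - 1 then [';'] else [','])))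
    = PySem.Chars.join [',', '\n'] (l.map pyHex08) ++ [';'] := by
  induction l with
  | nil => intro s h; exact absurd rfl h
  | cons x t ih =>
      intro s _
      cases t with
      | nil =>
          simp [PySem.List.enumerate_cons, PySem.List.enumerate_nil,
            PySem.Chars.join_singleton]
      | cons y u =>
          have hlen : s + ((x :: y :: u).length : Int) - 1
              = (s + 1) + ((y :: u).length : Int) - 1 := by
            simp only [List.length_cons]; push_cast; ring
          have htail := ih (s + 1) (by simp)
          rw [PySem.List.enumerate_cons] at htail
          rw [PySem.List.enumerate_cons, PySem.List.enumerate_cons]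
          rw [List.map_cons, List.map_cons, hlen, PySem.Chars.join_cons_cons]
          rw [List.map_cons] at htail
          rw [htail]
          have hpos : (0 : Int) < ((y :: u).length : Int) := by
            exact_mod_cast Nat.pos_of_ne_zero (by simp)
          rw [if_neg (by omega : ¬ (s = s + 1 + ((y :: u).length : Int) - 1))]
          simp only [List.map_cons]
          rw [PySem.Chars.join_cons_cons]
          simp

-- the '\n'-join of the 3 header lines followed by a nonempty entry list splits off the header block
theorem join_header_split (e : List Char) (r : List (List Char)) (h1 h2 h3 : List Char) :
    PySem.Chars.join ['\n'] ([h1, h2, h3] ++ e :: r)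
    = PySem.Chars.join ['\n'] [h1, h2, h3] ++ ['\n'] ++ PySem.Chars.join ['\n'] (e :: r) := by
  cases r <;>
    simp [PySem.Chars.join_cons_cons, PySem.Chars.join_singleton, List.append_assoc]

-- B's header literal is the '\n'-join of A's three header lines
theorem header_eq : PySem.Chars.join ['\n'] coeHeader = coeHeaderStr := by decide

-- pushing onto a list accumulator is append of the mapped elements
theorem foldl_push {A B : Type} (l : List A) (f : A → B) (a : List B) :
    l.foldl (fun ps c => ps ++ [f c]) a = a ++ l.map f := by
  induction l generalizing a with
  | nil => simp
  | cons x t ih => simp [ih]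

-- '\n'-joining comma-suffixed words followed by the terminated last word
-- equals the ',\n'-join of the bare words followed by one ';'
theorem join_parts (l : List Int) (last : Int) :
    PySem.Chars.join ['\n'] (l.map (fun c => pyHex08 c ++ [',']) ++ [pyHex08 last ++ [';']])
    = PySem.Chars.join [',', '\n'] ((l ++ [last]).map pyHex08) ++ [';'] := by
  induction l with
  | nil => simp [PySem.Chars.join_singleton]
  | cons x t ih =>
      cases t with
      | nil =>
          simp [PySem.Chars.join_singleton, PySem.Chars.join_cons_cons]
      | cons y u =>
          simp only [List.map_cons, List.cons_append] at ih ⊢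
          rw [PySem.Chars.join_cons_cons, ih]
          rw [PySem.Chars.join_cons_cons]
          simp

theorem format_coe_eq (codes : List Int) : format_coe codes = format_coe_alt codes := by
  unfold format_coe format_coe_alt
  cases hc : codes.getLast? with
  | none =>
      have : codes = [] := List.getLast?_eq_none_iff.mp hc
      subst this
      simp [PySem.List.enumerate_nil, header_eq]
  | some last =>
      have hne : codes ≠ [] := by
        intro h; subst h; simp at hc
      have hsplit : codes = codes.dropLast ++ [last] := by
        conv_lhs => rw [← List.dropLast_concat_getLast hne]
        rw [List.getLast?_eq_some_getLast hne] at hc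
        simp [Option.some_inj.mp hc]
      simp only [foldl_entries]
      have h := join_entries codes 0 hne
      rw [zero_add] at h
      obtain ⟨x, t, hxt⟩ := List.exists_cons_of_ne_nil hne
      have hmapne : (PySem.List.enumerate codes 0).map
          (fun p => pyHex08 p.2 ++ (if p.1 = (codes.length : Int) - 1 then [';'] else [','])) ≠ [] := by
        subst hxt; simp [PySem.List.enumerate_cons]
      obtain ⟨e, r, her⟩ := List.exists_cons_of_ne_nil hmapne
      unfold coeHeader
      rw [her, join_header_split, ← her, h]
      rw [foldl_push]
      have hrev : (([pyHex08 last ++ [';']] ++ codes.dropLast.reverse.map (fun c => pyHex08 c ++ [','])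
          ++ [coeHeaderStr]) : List (List Char)).reverse
          = coeHeaderStr :: (codes.dropLast.map (fun c => pyHex08 c ++ [',']) ++ [pyHex08 last ++ [';']]) := by
        simp [List.reverse_append, List.map_reverse]
      rw [hrev]
      have htne : codes.dropLast.map (fun c => pyHex08 c ++ [',']) ++ [pyHex08 last ++ [';']] ≠ [] := by simp
      obtain ⟨e2, r2, h2⟩ := List.exists_cons_of_ne_nil htne
      conv_rhs => rw [h2, PySem.Chars.join_cons_cons, ← h2, join_parts, ← hsplit]
      have hh := header_eq
      unfold coeHeader at hh
      rw [hh]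

-- ===== VERDICT =====
theorem format_coe_spec : Claim_equal_format_coe := by
  intro codes _
  unfold Spec_format_coe
  exact format_coe_eq codes
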